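-- pv_equiv track=rewrite | github.com/zubtsov/competitive-programming | futureskill.com/string-permutations-6400acf5de6ce41c4755df98/solution.py | level_1_common_letters
-- ===== SOURCE A (Python) =====
-- def level_1_common_letters(list_of_strings):
--     letters_count = {}
--     for s in list_of_strings:
--         letters_count_local = {}
--         for c in s:
--             if c in letters_count_local:
--                 letters_count_local[c] += 1
--             else:
--                 letters_count_local[c] = 1
--         for letter, count in letters_count_local.items():
--             if letter not in letters_count or letters_count[letter] < count:
--                 letters_count[letter] = count
--
--     return ''.join(map(lambda t: t[0] * t[1], sorted(letters_count.items())))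
-- ===== SOURCE B (Python) =====
-- def level_1_common_letters(list_of_strings):
--     chars = sorted({c for s in list_of_strings for c in s})
--     return ''.join(c * max((s.count(c) for s in list_of_strings), default=0)
--                    for c in chars)
-- ===== Notes on version B (the rewrite author's own statement) =====
-- stated objective: simpler
-- what changed: B drops A's running max-dict (per-string local counter merged into a global dict, then key-sorted with per-entry string multiplication): it sorts the set of all occurring characters once and, for each, emits the character repeated max(s.count(c)) over the strings.
import Mathlib
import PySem

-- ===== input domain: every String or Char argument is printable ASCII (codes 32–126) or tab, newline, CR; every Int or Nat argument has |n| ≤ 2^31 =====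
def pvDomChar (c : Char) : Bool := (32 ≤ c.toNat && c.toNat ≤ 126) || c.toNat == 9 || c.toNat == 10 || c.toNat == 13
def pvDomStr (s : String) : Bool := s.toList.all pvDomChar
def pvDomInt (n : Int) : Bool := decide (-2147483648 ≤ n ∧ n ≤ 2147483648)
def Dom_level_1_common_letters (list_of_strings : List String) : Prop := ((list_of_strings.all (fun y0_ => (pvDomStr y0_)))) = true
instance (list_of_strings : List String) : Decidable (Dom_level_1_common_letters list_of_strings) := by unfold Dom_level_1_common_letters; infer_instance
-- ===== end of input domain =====

-- B replaces A's running max-dict (a per-string local counter merged into a global dict, then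
-- key-sorted with per-entry multiplication) by: sort the set of occurring letters once and emit
-- each letter repeated its maximal per-string count (objective: simpler; not faster).

-- ===== PORT A =====
-- inner counting loop: if c in letters_count_local: += 1 else: = 1
def aLocalStep (d : PySem.Dict Char Int) (c : Char) : PySem.Dict Char Int :=
  if d.contains c then d.insert c (d.getD c 0 + 1) else d.insert c 1

-- merge loop body: if letter not in letters_count or letters_count[letter] < count: letters_count[letter] = count
def aMergeStep (lc : PySem.Dict Char Int) (p : Char × Int) : PySem.Dict Char Int :=
  if !lc.contains p.1 || decide (lc.getD p.1 0 < p.2) then lc.insert p.1 p.2 else lc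

def level_1_common_letters (list_of_strings : List String) : String :=
  let letters_count : PySem.Dict Char Int :=
    list_of_strings.foldl
      (fun lc s =>
        let letters_count_local := s.toList.foldl aLocalStep PySem.Dict.empty
        letters_count_local.items.foldl aMergeStep lc)
      PySem.Dict.empty
  -- ''.join(map(lambda t: t[0] * t[1], sorted(letters_count.items())))
  PySem.Str.join ""
    ((PySem.List.sorted2 letters_count.items (fun p => p.1) (fun p => p.2)).map
      (fun p => String.ofList (List.replicate p.2.toNat p.1)))

-- ===== PORT B =====
-- max((s.count(c) for s in list_of_strings), default=0)
def bMaxCount (list_of_strings : List String) (c : Char) : Int :=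
  PySem.List.maxD (list_of_strings.map (fun s => (PySem.Str.count s (String.ofList [c]) : Int)))
    (fun n => n) 0

def level_1_common_letters_alt (list_of_strings : List String) : String :=
  -- chars = sorted({c for s in list_of_strings for c in s})
  let chars := PySem.List.sorted
    (PySem.Set.ofList (list_of_strings.flatMap (fun s => s.toList))) (fun c => c) false
  PySem.Str.join ""
    (chars.map (fun c => String.ofList (List.replicate (bMaxCount list_of_strings c).toNat c)))

-- ===== PRECONDITION & SPEC =====
def Spec_level_1_common_letters (list_of_strings : List String) (out : String) : Prop := out = level_1_common_letters_alt list_of_strings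
instance (list_of_strings : List String) (out : String) : Decidable (Spec_level_1_common_letters list_of_strings out) := by unfold Spec_level_1_common_letters; infer_instance

-- ===== CLAIM (what is proved, stated in full; the proofs are below) =====
def Claim_equal_level_1_common_letters : Prop := ∀ (list_of_strings : List String), Dom_level_1_common_letters list_of_strings → Spec_level_1_common_letters list_of_strings (level_1_common_letters list_of_strings)

-- ===== LEMMAS AND PROOFS =====

-- the per-letter maximum count over the input strings, which both programs compute
def pvMax (L : List String) (c : Char) : Int :=
  L.foldl (fun m s => max m ((List.count c s.toList : Nat) : Int)) 0

lemma pvMax_nonneg (L : List String) (c : Char) : 0 ≤ pvMax L c := by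
  unfold pvMax
  have : ∀ (l : List String) (m : Int), 0 ≤ m → 0 ≤ l.foldl (fun m s => max m ((List.count c s.toList : Nat) : Int)) m := by
    intro l
    induction l with
    | nil => intro m hm; simpa using hm
    | cons x t ih => intro m hm; simp only [List.foldl_cons]; exact ih _ (le_max_of_le_left hm)
  exact this L 0 le_rfl

lemma pvMax_append_singleton (L : List String) (s : String) (c : Char) :
    pvMax (L ++ [s]) c = max (pvMax L c) ((List.count c s.toList : Nat) : Int) := by
  unfold pvMax; rw [List.foldl_append]; rfl

lemma pvMax_eq_zero_of_not_mem (L : List String) (c : Char)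
    (h : c ∉ L.flatMap (fun s => s.toList)) : pvMax L c = 0 := by
  induction L using List.reverseRecOn with
  | nil => rfl
  | append_singleton L s ih =>
    rw [pvMax_append_singleton]
    simp only [List.flatMap_append, List.mem_append, not_or] at h
    obtain ⟨h1, h2⟩ := h
    have hc : List.count c s.toList = 0 := by
      rw [List.count_eq_zero]
      intro hm; exact h2 (by simpa using hm)
    rw [ih h1, hc]; simp

lemma count_go_single (c : Char) :
    ∀ (fuel : Nat) (cs : List Char) (acc : Nat), cs.length ≤ fuel →
      PySem.Chars.count.go [c] fuel cs acc = acc + cs.count c := by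
  intro fuel
  induction fuel with
  | zero =>
    intro cs acc h
    have : cs = [] := List.eq_nil_of_length_eq_zero (Nat.le_zero.mp h)
    subst this; simp [PySem.Chars.count.go]
  | succ n ih =>
    intro cs acc h
    cases cs with
    | nil => simp [PySem.Chars.count.go]
    | cons x t =>
      simp only [PySem.Chars.count.go]
      by_cases hx : x = c
      · subst hx
        have : List.isPrefixOf [x] (x :: t) = true := by simp [List.isPrefixOf]
        rw [if_pos this]
        simp only [List.length_cons, Nat.add_le_add_iff_right] at h
        have hd : List.drop ([x].length) (x :: t) = t := by simp
        rw [hd, ih t (acc+1) h]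
        simp; omega
      · have : List.isPrefixOf [c] (x :: t) = false := by
          simp [List.isPrefixOf]; exact fun hh => hx hh.symm
        rw [if_neg (by simp [this])]
        simp only [List.length_cons, Nat.add_le_add_iff_right] at h
        rw [ih t acc h]
        simp [hx]

lemma str_count_single (s : String) (c : Char) :
    PySem.Str.count s (String.ofList [c]) = s.toList.count c := by
  have h1 : PySem.Str.count s (String.ofList [c]) = PySem.Chars.count s.toList [c] := by
    simp [pysem]
  rw [h1]
  unfold PySem.Chars.count
  rw [if_neg (by simp)]
  have := count_go_single c s.toList.length s.toList 0 le_rfl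
  rw [this]; omega

lemma max?_cons_int (l : List Int) : ∀ (x : Int),
    PySem.List.max? (x :: l) (fun n => n) = some (l.foldl (fun a b => max a b) x) := by
  induction l with
  | nil => intro x; rfl
  | cons y t ih =>
    intro x
    have key : PySem.List.max? (x :: y :: t) (fun n => n)
        = PySem.List.max? (max x y :: t) (fun n => n) := by
      unfold PySem.List.max?
      simp only [List.foldl_cons]
      congr 1
      by_cases h : x < y <;> simp [h, max_def] <;> omega
    rw [key, ih]
    simp

lemma bMaxCount_eq (L : List String) (c : Char) : bMaxCount L c = pvMax L c := by
  cases L with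
  | nil => rfl
  | cons s t =>
    unfold bMaxCount PySem.List.maxD
    simp only [List.map_cons]
    rw [max?_cons_int]
    simp only [Option.getD_some]
    rw [List.foldl_map]
    unfold pvMax
    simp only [List.foldl_cons, str_count_single]
    have h0 : max (0 : Int) ((List.count c s.toList : Nat) : Int)
        = ((List.count c s.toList : Nat) : Int) := max_eq_right (by positivity)
    rw [h0]

lemma set_update_add (j t : PySem.Set Char) (x : Char) :
    PySem.Set.update j (PySem.Set.add t x) = PySem.Set.add (PySem.Set.update j t) x := by
  by_cases h : x ∈ t
  · have h1 : PySem.Set.add t x = t := by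
      unfold PySem.Set.add
      rw [if_pos ((PySem.Set.contains_iff t x).mpr h)]
    have h2 : PySem.Set.add (PySem.Set.update j t) x = PySem.Set.update j t := by
      unfold PySem.Set.add
      rw [if_pos ((PySem.Set.contains_iff _ x).mpr ((PySem.Set.mem_update j t x).mpr (Or.inr h)))]
    rw [h1, h2]
  · have h1 : PySem.Set.add t x = t ++ [x] := by
      unfold PySem.Set.add
      rw [if_neg (by rw [PySem.Set.contains_iff]; exact h)]
    rw [h1]
    unfold PySem.Set.update
    rw [List.foldl_append]
    rfl

lemma set_update_update (B : List Char) : ∀ (j t : PySem.Set Char),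
    PySem.Set.update j (PySem.Set.update t B) = PySem.Set.update (PySem.Set.update j t) B := by
  induction B with
  | nil => intro j t; rfl
  | cons x B' ih =>
    intro j t
    have h1 : PySem.Set.update t (x :: B') = PySem.Set.update (PySem.Set.add t x) B' := rfl
    have h2 : PySem.Set.update (PySem.Set.update j t) (x :: B')
        = PySem.Set.update (PySem.Set.add (PySem.Set.update j t) x) B' := rfl
    rw [h1, h2, ih j (PySem.Set.add t x), set_update_add]

lemma set_update_ofList (j : PySem.Set Char) (B : List Char) :
    PySem.Set.update j (PySem.Set.ofList B) = PySem.Set.update j B := by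
  have h1 : PySem.Set.ofList B = PySem.Set.update ([] : PySem.Set Char) B := rfl
  rw [h1, set_update_update B j []]
  rfl

lemma merge_items (f : Char → Int) :
    ∀ (ks : List Char) (js : List Char) (g : Char → Int) (lc : PySem.Dict Char Int),
      ks.Nodup → js.Nodup → lc.items = js.map (fun c => (c, g c)) →
      ((ks.map (fun c => (c, f c))).foldl aMergeStep lc).items =
        (PySem.Set.update js ks).map (fun c =>
          (c, if c ∈ js then (if c ∈ ks then max (g c) (f c) else g c) else f c)) := by
  intro ks
  induction ks with
  | nil =>
    intro js g lc _ _ hitems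
    simp only [List.map_nil, List.foldl_nil]
    rw [hitems]
    apply List.map_congr_left
    intro c hc
    simp [hc]
  | cons c₀ ks' ih =>
    intro js g lc hks hjs hitems
    have hkeys : lc.keys = js := by
      show lc.items.map Prod.fst = js
      rw [hitems, List.map_map]
      have hcomp : (Prod.fst ∘ fun c : Char => (c, g c)) = id := rfl
      rw [hcomp, List.map_id]
    have hknodup : lc.keys.Nodup := by rw [hkeys]; exact hjs
    have hc0ks' : c₀ ∉ ks' := (List.nodup_cons.mp hks).1
    have hks' : ks'.Nodup := (List.nodup_cons.mp hks).2
    simp only [List.map_cons, List.foldl_cons]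
    by_cases hj : c₀ ∈ js
    · have hcont : lc.contains c₀ = true := by
        rw [PySem.Dict.contains_iff_mem_keys, hkeys]; exact hj
      have hget : lc.getD c₀ 0 = g c₀ := by
        apply PySem.Dict.getD_of_mem_items lc _ hknodup
        rw [hitems]
        exact List.mem_map.mpr ⟨c₀, hj, rfl⟩
      set g₁ : Char → Int := fun c => if c = c₀ then max (g c₀) (f c₀) else g c with hg₁
      have hstep : (aMergeStep lc (c₀, f c₀)).items = js.map (fun c => (c, g₁ c)) := by
        simp only [aMergeStep, hcont, hget, Bool.not_true, Bool.false_or]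
        by_cases hlt : g c₀ < f c₀
        · rw [if_pos (by simpa using hlt)]
          rw [PySem.Dict.items_insert_of_contains lc _ hcont, hitems, List.map_map]
          apply List.map_congr_left
          intro c hc
          by_cases hcc : c = c₀
          · subst hcc
            simp [hg₁, max_eq_right (le_of_lt hlt)]
          · simp [hg₁, hcc, Function.comp]
        · rw [if_neg (by simpa using hlt)]
          rw [hitems]
          apply List.map_congr_left
          intro c hc
          by_cases hcc : c = c₀
          · subst hcc
            simp [hg₁, max_eq_left (not_lt.mp hlt)]
          · simp [hg₁, hcc]
      have := ih js g₁ (aMergeStep lc (c₀, f c₀)) hks' hjs hstep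
      rw [this]
      have hupd : PySem.Set.update js (c₀ :: ks') = PySem.Set.update js ks' := by
        show PySem.Set.update (PySem.Set.add js c₀) ks' = PySem.Set.update js ks'
        have : PySem.Set.add js c₀ = js := by
          unfold PySem.Set.add
          rw [if_pos ((PySem.Set.contains_iff js c₀).mpr hj)]
        rw [this]
      rw [hupd]
      apply List.map_congr_left
      intro c hc
      by_cases hcc : c = c₀
      · subst hcc
        simp [hg₁, hj, hc0ks', List.mem_cons]
      · simp only [hg₁]
        rw [if_neg hcc]
        by_cases hcj : c ∈ js
        · simp [hcj, List.mem_cons, hcc]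
        · simp [hcj]
    · have hcont : lc.contains c₀ = false := by
        rw [Bool.eq_false_iff]
        intro hcontra
        exact hj (hkeys ▸ (PySem.Dict.contains_iff_mem_keys lc c₀).mp hcontra)
      set g₂ : Char → Int := fun c => if c = c₀ then f c₀ else g c with hg₂
      have hstep : (aMergeStep lc (c₀, f c₀)).items = (js ++ [c₀]).map (fun c => (c, g₂ c)) := by
        simp only [aMergeStep, hcont, Bool.not_false, Bool.true_or, if_true]
        rw [PySem.Dict.items_insert_of_not_contains lc _ hcont, hitems, List.map_append]
        congr 1
        · apply List.map_congr_left
          intro c hc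
          have : c ≠ c₀ := fun h => hj (h ▸ hc)
          simp [hg₂, this]
        · simp [hg₂]
      have hjs' : (js ++ [c₀]).Nodup := by
        rw [List.nodup_append]
        refine ⟨hjs, List.nodup_singleton _, ?_⟩
        intro a ha b hb
        rw [List.mem_singleton] at hb
        subst hb
        exact fun h => hj (h ▸ ha)
      have := ih (js ++ [c₀]) g₂ (aMergeStep lc (c₀, f c₀)) hks' hjs' hstep
      rw [this]
      have hupd : PySem.Set.update js (c₀ :: ks') = PySem.Set.update (js ++ [c₀]) ks' := by
        show PySem.Set.update (PySem.Set.add js c₀) ks' = _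
        have : PySem.Set.add js c₀ = js ++ [c₀] := by
          unfold PySem.Set.add
          rw [if_neg (by rw [PySem.Set.contains_iff]; exact hj)]
        rw [this]
      rw [hupd]
      apply List.map_congr_left
      intro c hc
      by_cases hcc : c = c₀
      · subst hcc
        simp [hg₂, hj, hc0ks']
      · simp only [hg₂]
        rw [if_neg hcc]
        by_cases hcj : c ∈ js
        · simp [hcj, hcc, List.mem_append]
        · simp [hcj, hcc, List.mem_append]

lemma local_eq_counter (cs : List Char) :
    cs.foldl aLocalStep PySem.Dict.empty = PySem.Dict.counter cs := by
  rw [← PySem.Dict.foldl_insert_getD_add_one_eq_counter]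
  apply List.foldl_ext
  intro d c _
  unfold aLocalStep
  by_cases h : d.contains c = true
  · rw [if_pos h]
  · rw [if_neg h]
    rw [PySem.Dict.getD_of_not_contains d 0 (Bool.eq_false_iff.mpr h)]
    norm_num

lemma letters_items (L : List String) :
    (L.foldl
      (fun lc s => ((s.toList.foldl aLocalStep PySem.Dict.empty).items).foldl aMergeStep lc)
      PySem.Dict.empty).items =
    (PySem.Set.ofList (L.flatMap (fun s => s.toList))).map (fun c => (c, pvMax L c)) := by
  induction L using List.reverseRecOn with
  | nil => rfl
  | append_singleton L s ih =>
    rw [List.foldl_append]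
    simp only [List.foldl_cons, List.foldl_nil]
    rw [local_eq_counter, PySem.Dict.items_counter]
    have hmerge := merge_items (fun c => ((List.count c s.toList : Nat) : Int))
      (PySem.Set.ofList s.toList)
      (PySem.Set.ofList (L.flatMap (fun s => s.toList)))
      (pvMax L) _
      (PySem.Set.nodup_ofList _) (PySem.Set.nodup_ofList _) ih
    rw [hmerge]
    have hupd : PySem.Set.update (PySem.Set.ofList (L.flatMap (fun s => s.toList)))
        (PySem.Set.ofList s.toList)
        = PySem.Set.ofList ((L ++ [s]).flatMap (fun s => s.toList)) := by
      rw [set_update_ofList]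
      have : (L ++ [s]).flatMap (fun s => s.toList)
          = L.flatMap (fun s => s.toList) ++ s.toList := by
        simp
      rw [this]
      conv_rhs => rw [PySem.Set.ofList_eq_foldl, List.foldl_append]
      rfl
    rw [hupd]
    apply List.map_congr_left
    intro c hc
    rw [pvMax_append_singleton]
    have hmem := (PySem.Set.mem_ofList _ c).mp hc
    by_cases hcj : c ∈ PySem.Set.ofList (L.flatMap (fun s => s.toList))
    · rw [if_pos hcj]
      by_cases hck : c ∈ PySem.Set.ofList s.toList
      · rw [if_pos hck]
      · rw [if_neg hck]
        have h0 : List.count c s.toList = 0 := by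
          rw [List.count_eq_zero]
          intro hm
          exact hck ((PySem.Set.mem_ofList _ c).mpr hm)
        rw [h0]
        simp [max_eq_left (pvMax_nonneg L c)]
    · rw [if_neg hcj]
      have h0 : pvMax L c = 0 := pvMax_eq_zero_of_not_mem L c
        (fun hm => hcj ((PySem.Set.mem_ofList _ c).mpr hm))
      rw [h0]
      simp

lemma insertBy_congr {α : Type} (b₁ b₂ : α → α → Bool) (x : α) :
    ∀ (ys : List α), (∀ y ∈ ys, b₁ x y = b₂ x y) →
      PySem.List.insertBy b₁ x ys = PySem.List.insertBy b₂ x ys := by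
  intro ys
  induction ys with
  | nil => intro _; rfl
  | cons y t ih =>
    intro h
    have hy : b₁ x y = b₂ x y := h y (List.mem_cons_self)
    simp only [PySem.List.insertBy, hy]
    by_cases hb : b₂ x y = true
    · rw [if_pos hb, if_pos hb]
    · rw [if_neg hb, if_neg hb]
      have := ih (fun z hz => h z (List.mem_cons_of_mem _ hz))
      rw [this]

lemma foldl_insertBy_congr {α : Type} (b₁ b₂ : α → α → Bool) (S : List α)
    (hb : ∀ a ∈ S, ∀ b ∈ S, b₁ a b = b₂ a b) :
    ∀ (xs acc : List α), (∀ a ∈ xs, a ∈ S) → (∀ a ∈ acc, a ∈ S) →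
      xs.foldl (fun acc x => PySem.List.insertBy b₁ x acc) acc =
      xs.foldl (fun acc x => PySem.List.insertBy b₂ x acc) acc := by
  intro xs
  induction xs with
  | nil => intro acc _ _; rfl
  | cons x t ih =>
    intro acc hxs hacc
    simp only [List.foldl_cons]
    have hx : x ∈ S := hxs x List.mem_cons_self
    have h1 : PySem.List.insertBy b₁ x acc = PySem.List.insertBy b₂ x acc :=
      insertBy_congr b₁ b₂ x acc (fun y hy => hb x hx y (hacc y hy))
    rw [h1]
    exact ih (PySem.List.insertBy b₂ x acc)
      (fun a ha => hxs a (List.mem_cons_of_mem _ ha))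
      (fun a ha => by
        rcases (PySem.List.mem_insertBy b₂ x a acc).mp ha with h | h
        · exact h ▸ hx
        · exact hacc a h)

lemma sorted2_eq_sorted_fst (xs : List (Char × Int))
    (hinj : ∀ a ∈ xs, ∀ b ∈ xs, a.1 = b.1 → a = b) :
    PySem.List.sorted2 xs (fun p => p.1) (fun p => p.2) false =
    PySem.List.sorted xs (fun p => p.1) := by
  rw [PySem.List.sorted_eq_foldl_insertBy]
  unfold PySem.List.sorted2
  simp only [if_neg (by decide : ¬ (false = true))]
  apply foldl_insertBy_congr _ _ xs _ xs [] (fun a ha => ha) (fun a ha => nomatch ha)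
  intro a ha b hb
  by_cases h1 : a.1 < b.1
  · simp [h1]
  · by_cases h2 : b.1 < a.1
    · simp [h1, h2]
    · have : a.1 = b.1 := le_antisymm (not_lt.mp h2) (not_lt.mp h1)
      have hab : a = b := hinj a ha b hb this
      subst hab
      simp


lemma ports_agree (L : List String) : level_1_common_letters L = level_1_common_letters_alt L := by
  unfold level_1_common_letters level_1_common_letters_alt
  simp only []
  rw [letters_items]
  set K := PySem.Set.ofList (L.flatMap (fun s => s.toList)) with hK
  set sortedK := PySem.List.sorted K (fun c => c) false with hsK
  have hinj : ∀ a ∈ K.map (fun c => (c, pvMax L c)), ∀ b ∈ K.map (fun c => (c, pvMax L c)),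
      a.1 = b.1 → a = b := by
    intro a ha b hb hfst
    rcases List.mem_map.mp ha with ⟨c, _, rfl⟩
    rcases List.mem_map.mp hb with ⟨c', _, rfl⟩
    simp only at hfst
    subst hfst
    rfl
  rw [sorted2_eq_sorted_fst _ hinj]
  have hsorted : PySem.List.sorted (K.map (fun c => (c, pvMax L c))) (fun p => p.1)
      = sortedK.map (fun c => (c, pvMax L c)) := by
    apply PySem.List.sorted_eq_of_perm_of_pairwise_lt
    · exact ((PySem.List.sorted_perm K (fun c => c) false).map _)
    · have hp : List.Pairwise (· < ·) sortedK := PySem.List.sorted_ofList_pairwise_lt _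
      exact List.pairwise_map.mpr hp
  rw [hsorted, List.map_map]
  simp only [bMaxCount_eq]
  rfl

-- ===== VERDICT (by name: the statement is the Claim_ definition above) =====
theorem level_1_common_letters_spec : Claim_equal_level_1_common_letters := by
  intro L _
  unfold Spec_level_1_common_letters
  exact ports_agree L
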